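-- pv_equiv track=rewrite | github.com/Roberto-rgb-code/Mapa-ciudad-de-las-rosas | refine_georeferences.py | extraer_objetos_con_braces
-- ===== SOURCE A (Python) =====
-- def extraer_objetos_con_braces(content, inicio_marker):
--     idx = content.find(inicio_marker)
--     if idx == -1: return []
--     idx = content.find("[", idx) + 1
--     resultados = []
--     n = len(content)
--     while idx < n:
--         while idx < n and content[idx] in " \t\n\r,":
--             idx += 1
--         if idx >= n or content[idx] == "]": break
--         if content[idx] != "{":
--             idx += 1
--             continue
--         start = idx
--         depth = 1
--         idx += 1
--         while idx < n and depth > 0: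
--             if content[idx] == '"':
--                 idx += 1
--                 while idx < n and content[idx] != '"':
--                     if content[idx] == "\\": idx += 1
--                     idx += 1
--                 if idx < n: idx += 1
--                 continue
--             if content[idx] == "'":
--                 idx += 1
--                 while idx < n and content[idx] != "'":
--                     if content[idx] == "\\": idx += 1
--                     idx += 1
--                 if idx < n: idx += 1
--                 continue
--             if content[idx] == "{": depth += 1
--             elif content[idx] == "}": depth -= 1
--             idx += 1
--         end = idx - 1
--         obj_str = content[start : end + 1]
--         resultados.append((obj_str, start, end))
--     return resultados
-- ===== SOURCE B (Python) =====
-- # Same prelude (find marker / find '['); the object scanner is one flat per-character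
-- # while-loop with explicit depth/quote state instead of A's nested scanning loops.
-- def extraer_objetos_con_braces(content, inicio_marker):
--     idx = content.find(inicio_marker)
--     if idx == -1:
--         return []
--     idx = content.find("[", idx) + 1
--     n = len(content)
--     resultados = []
--     start = 0
--     depth = 0
--     quote = ""
--     while idx < n:
--         c = content[idx]
--         if depth == 0:
--             if c in " \t\n\r,":
--                 idx += 1
--             elif c == "]":
--                 break
--             elif c == "{":
--                 start = idx
--                 depth = 1
--                 idx += 1
--             else:
--                 idx += 1
--         elif quote:
--             if c == quote:
--                 quote = ""
--             elif c == "\\":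
--                 idx += 1
--             idx += 1
--         else:
--             if c == '"' or c == "'":
--                 quote = c
--             elif c == "{":
--                 depth += 1
--             elif c == "}":
--                 depth -= 1
--                 if depth == 0:
--                     resultados.append((content[start : idx + 1], start, idx))
--             idx += 1
--     if depth > 0:
--         resultados.append((content[start:idx], start, idx - 1))
--     return resultados
-- ===== Notes on version B (the rewrite author's own statement) =====
-- stated objective: alternative
-- what changed: A's nested loops (inner whitespace-skip loop, a per-object loop with two dedicated string-skipping inner loops) are replaced by one flat while-loop that handles one character per iteration and carries explicit state: brace depth, object start, and the current quote character.
import Mathlib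
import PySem

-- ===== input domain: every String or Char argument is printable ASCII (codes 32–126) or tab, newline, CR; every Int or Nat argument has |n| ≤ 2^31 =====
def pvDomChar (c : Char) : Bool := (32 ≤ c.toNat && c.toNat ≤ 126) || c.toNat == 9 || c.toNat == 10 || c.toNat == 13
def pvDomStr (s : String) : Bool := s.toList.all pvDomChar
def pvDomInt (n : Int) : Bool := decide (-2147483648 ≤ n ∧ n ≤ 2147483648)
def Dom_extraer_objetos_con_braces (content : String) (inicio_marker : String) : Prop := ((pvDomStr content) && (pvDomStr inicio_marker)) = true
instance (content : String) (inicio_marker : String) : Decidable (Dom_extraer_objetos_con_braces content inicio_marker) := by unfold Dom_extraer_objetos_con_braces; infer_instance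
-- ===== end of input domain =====

-- B replaces A's nested object/string scanning loops by ONE flat per-character loop with
-- explicit depth/quote state (objective: alternative decomposition, same cost).
-- All loops are fueled structural recursions: every iteration advances the index by ≥ 1 and the
-- loops stop once the index reaches the length, so fuel = length+1 never runs out (a pure
-- totality guard; the fuel-0 value is the loop-exit value at the current state).

-- ===== PORT A =====
-- A's inner whitespace-skip loop.
def pvSkipWsA (cs : List Char) : Nat → Nat → Nat
  | 0, i => i
  | fuel+1, i =>
    if i < cs.length ∧ cs.getD i ' ' ∈ [' ', '\t', '\n', '\r', ','] then pvSkipWsA cs fuel (i+1)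
    else i

-- A's string-skipping loop (entered after the opening quote): while idx<n and c!=q
-- (a backslash skips 2); then `if idx<n: idx+=1`.
def pvScanStrA (cs : List Char) (q : Char) : Nat → Nat → Nat
  | 0, i => i
  | fuel+1, i =>
    if i < cs.length ∧ cs.getD i ' ' ≠ q then
      if cs.getD i ' ' = '\\' then pvScanStrA cs q fuel (i+2) else pvScanStrA cs q fuel (i+1)
    else if i < cs.length then i + 1 else i

-- A's object loop: while idx<n and depth>0.
def pvScanObjA (cs : List Char) : Nat → Nat → Nat → Nat
  | 0, _, i => i
  | fuel+1, depth, i =>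
    if i < cs.length ∧ 0 < depth then
      if cs.getD i ' ' = '"' then pvScanObjA cs fuel depth (pvScanStrA cs '"' fuel (i+1))
      else if cs.getD i ' ' = '\'' then pvScanObjA cs fuel depth (pvScanStrA cs '\'' fuel (i+1))
      else if cs.getD i ' ' = '{' then pvScanObjA cs fuel (depth+1) (i+1)
      else if cs.getD i ' ' = '}' then pvScanObjA cs fuel (depth-1) (i+1)
      else pvScanObjA cs fuel depth (i+1)
    else i

-- A's outer while loop. content[start:end+1] with 0 ≤ start ≤ end+1 is exactly take∘drop
-- (Python clamps a bound past the end, so does take).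
def pvOuterA (cs : List Char) : Nat → Nat → List (String × Int × Int) → List (String × Int × Int)
  | 0, _, acc => acc
  | fuel+1, i, acc =>
    if i < cs.length then
      if cs.length ≤ pvSkipWsA cs fuel i then acc
      else if cs.getD (pvSkipWsA cs fuel i) ' ' = ']' then acc
      else if cs.getD (pvSkipWsA cs fuel i) ' ' ≠ '{' then pvOuterA cs fuel (pvSkipWsA cs fuel i + 1) acc
      else
        pvOuterA cs fuel (pvScanObjA cs fuel 1 (pvSkipWsA cs fuel i + 1))
          (acc ++ [(String.ofList ((cs.drop (pvSkipWsA cs fuel i)).take (pvScanObjA cs fuel 1 (pvSkipWsA cs fuel i + 1) - pvSkipWsA cs fuel i)),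
                    (pvSkipWsA cs fuel i : Int), (pvScanObjA cs fuel 1 (pvSkipWsA cs fuel i + 1) : Int) - 1)])
    else acc

-- find(marker) then find("[", idx)+1: both exact PySem primitives; the resulting start index
-- is a Python int ≥ 0 (find ≥ -1, plus 1), so .toNat is exact.
def extraer_objetos_con_braces (content : String) (inicio_marker : String) : List (String × Int × Int) :=
  if PySem.Str.find content inicio_marker = -1 then []
  else pvOuterA content.toList (content.toList.length + 1)
        (PySem.Str.findFrom content "[" (PySem.Str.find content inicio_marker) + 1).toNat []

-- ===== PORT B =====
-- B's single flat loop: one character per iteration; state = depth, object start, quote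
-- (Python B uses "" for 'no quote'; Option Char here). The trailing if-depth>0 append after
-- the loop is the fueled recursion's exit value.
def pvLoopB (cs : List Char) : Nat → Nat → Nat → Nat → Option Char → List (String × Int × Int) → List (String × Int × Int)
  | 0, i, depth, start, _, acc =>
    if 0 < depth then acc ++ [(String.ofList ((cs.drop start).take (i - start)), (start : Int), (i : Int) - 1)]
    else acc
  | fuel+1, i, depth, start, quote, acc =>
    if i < cs.length then
      if depth = 0 then
        if cs.getD i ' ' ∈ [' ', '\t', '\n', '\r', ','] then pvLoopB cs fuel (i+1) depth start quote acc
        else if cs.getD i ' ' = ']' then acc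
        else if cs.getD i ' ' = '{' then pvLoopB cs fuel (i+1) 1 i quote acc
        else pvLoopB cs fuel (i+1) depth start quote acc
      else
        match quote with
        | some q =>
            if cs.getD i ' ' = q then pvLoopB cs fuel (i+1) depth start none acc
            else if cs.getD i ' ' = '\\' then pvLoopB cs fuel (i+2) depth start (some q) acc
            else pvLoopB cs fuel (i+1) depth start (some q) acc
        | none =>
            if cs.getD i ' ' = '"' ∨ cs.getD i ' ' = '\'' then pvLoopB cs fuel (i+1) depth start (some (cs.getD i ' ')) acc
            else if cs.getD i ' ' = '{' then pvLoopB cs fuel (i+1) (depth+1) start none acc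
            else if cs.getD i ' ' = '}' then
              if depth = 1 then
                pvLoopB cs fuel (i+1) 0 start none
                  (acc ++ [(String.ofList ((cs.drop start).take (i + 1 - start)), (start : Int), (i : Int))])
              else pvLoopB cs fuel (i+1) (depth-1) start none acc
            else pvLoopB cs fuel (i+1) depth start none acc
    else
      if 0 < depth then acc ++ [(String.ofList ((cs.drop start).take (i - start)), (start : Int), (i : Int) - 1)]
      else acc

def extraer_objetos_con_braces_alt (content : String) (inicio_marker : String) : List (String × Int × Int) :=
  if PySem.Str.find content inicio_marker = -1 then []
  else pvLoopB content.toList (content.toList.length + 1)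
        (PySem.Str.findFrom content "[" (PySem.Str.find content inicio_marker) + 1).toNat 0 0 none []

-- ===== PRECONDITION & SPEC =====
def Spec_extraer_objetos_con_braces (content : String) (inicio_marker : String) (out : List (String × Int × Int)) : Prop := out = extraer_objetos_con_braces_alt content inicio_marker
instance (content : String) (inicio_marker : String) (out : List (String × Int × Int)) : Decidable (Spec_extraer_objetos_con_braces content inicio_marker out) := by unfold Spec_extraer_objetos_con_braces; infer_instance

-- ===== CLAIM (what is proved, stated in full; the proofs are below) =====
def Claim_equal_extraer_objetos_con_braces : Prop := ∀ (content : String) (inicio_marker : String), Dom_extraer_objetos_con_braces content inicio_marker → Spec_extraer_objetos_con_braces content inicio_marker (extraer_objetos_con_braces content inicio_marker)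

-- ===== LEMMAS AND PROOFS =====

theorem le_pvScanStrA (cs : List Char) (q : Char) : ∀ (fuel i : Nat), i ≤ pvScanStrA cs q fuel i := by
  intro fuel
  induction fuel with
  | zero => intro i; simp [pvScanStrA]
  | succ fuel ih =>
    intro i
    simp only [pvScanStrA]
    split
    · split
      · have := ih (i+2); omega
      · have := ih (i+1); omega
    · split <;> omega

theorem pvSkipWsA_stop (cs : List Char) (fuel i : Nat)
    (h : ¬ (i < cs.length ∧ cs.getD i ' ' ∈ [' ', '\t', '\n', '\r', ','])) :
    pvSkipWsA cs fuel i = i := by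
  cases fuel with
  | zero => rfl
  | succ fuel => rw [pvSkipWsA, if_neg h]

theorem pvScanStrA_stop (cs : List Char) (q : Char) (fuel i : Nat) (h : ¬ i < cs.length) :
    pvScanStrA cs q fuel i = i := by
  cases fuel with
  | zero => rfl
  | succ fuel => rw [pvScanStrA, if_neg (fun hh => h hh.1), if_neg h]

theorem pvScanObjA_stop (cs : List Char) (fuel depth i : Nat) (h : ¬ i < cs.length) :
    pvScanObjA cs fuel depth i = i := by
  cases fuel with
  | zero => rfl
  | succ fuel => rw [pvScanObjA, if_neg (fun hh => h hh.1)]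

theorem pvScanObjA_depth0 (cs : List Char) (fuel i : Nat) : pvScanObjA cs fuel 0 i = i := by
  cases fuel with
  | zero => rfl
  | succ fuel => rw [pvScanObjA, if_neg (fun hh => by omega)]

theorem le_pvScanObjA (cs : List Char) : ∀ (fuel depth i : Nat), i ≤ pvScanObjA cs fuel depth i := by
  intro fuel
  induction fuel with
  | zero => intro depth i; simp [pvScanObjA]
  | succ fuel ih =>
    intro depth i
    simp only [pvScanObjA]
    split
    · split
      · have h1 := le_pvScanStrA cs '"' fuel (i+1)
        have h2 := ih depth (pvScanStrA cs '"' fuel (i+1)); omega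
      · split
        · have h1 := le_pvScanStrA cs '\'' fuel (i+1)
          have h2 := ih depth (pvScanStrA cs '\'' fuel (i+1)); omega
        · split
          · have := ih (depth+1) (i+1); omega
          · split
            · have := ih (depth-1) (i+1); omega
            · have := ih depth (i+1); omega
    · omega

theorem le_pvSkipWsA (cs : List Char) : ∀ (fuel i : Nat), i ≤ pvSkipWsA cs fuel i := by
  intro fuel
  induction fuel with
  | zero => intro i; simp [pvSkipWsA]
  | succ fuel ih =>
    intro i
    simp only [pvSkipWsA]
    split
    · have := ih (i+1); omega
    · omega

-- fuel irrelevance: any two sufficient fuels compute the same value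
theorem pvSkipWsA_inv (cs : List Char) : ∀ (f1 f2 i : Nat), cs.length ≤ i + f1 → cs.length ≤ i + f2 →
    pvSkipWsA cs f1 i = pvSkipWsA cs f2 i := by
  intro f1
  induction f1 with
  | zero =>
    intro f2 i h1 h2
    rw [pvSkipWsA_stop cs 0 i (fun hh => by omega), pvSkipWsA_stop cs f2 i (fun hh => by omega)]
  | succ f1 ih =>
    intro f2 i h1 h2
    by_cases hc : i < cs.length ∧ cs.getD i ' ' ∈ [' ', '\t', '\n', '\r', ',']
    · cases f2 with
      | zero => omega
      | succ f2 =>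
        rw [pvSkipWsA, pvSkipWsA, if_pos hc, if_pos hc]
        exact ih f2 (i+1) (by omega) (by omega)
    · rw [pvSkipWsA_stop cs _ i hc, pvSkipWsA_stop cs _ i hc]

theorem pvScanStrA_inv (cs : List Char) (q : Char) : ∀ (f1 f2 i : Nat), cs.length ≤ i + f1 → cs.length ≤ i + f2 →
    pvScanStrA cs q f1 i = pvScanStrA cs q f2 i := by
  intro f1
  induction f1 with
  | zero =>
    intro f2 i h1 h2
    rw [pvScanStrA_stop cs q 0 i (by omega), pvScanStrA_stop cs q f2 i (by omega)]
  | succ f1 ih =>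
    intro f2 i h1 h2
    by_cases hc : i < cs.length ∧ cs.getD i ' ' ≠ q
    · cases f2 with
      | zero => omega
      | succ f2 =>
        rw [pvScanStrA, pvScanStrA, if_pos hc, if_pos hc]
        by_cases hb : cs.getD i ' ' = '\\'
        · rw [if_pos hb, if_pos hb]; exact ih f2 (i+2) (by omega) (by omega)
        · rw [if_neg hb, if_neg hb]; exact ih f2 (i+1) (by omega) (by omega)
    · by_cases hn : i < cs.length
      · cases f2 with
        | zero => omega
        | succ f2 => rw [pvScanStrA, pvScanStrA, if_neg hc, if_neg hc]
      · rw [pvScanStrA_stop cs q _ i hn, pvScanStrA_stop cs q _ i hn]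

theorem pvScanObjA_inv (cs : List Char) : ∀ (f1 f2 depth i : Nat), cs.length ≤ i + f1 → cs.length ≤ i + f2 →
    pvScanObjA cs f1 depth i = pvScanObjA cs f2 depth i := by
  intro f1
  induction f1 with
  | zero =>
    intro f2 depth i h1 h2
    rw [pvScanObjA_stop cs 0 depth i (by omega), pvScanObjA_stop cs f2 depth i (by omega)]
  | succ f1 ih =>
    intro f2 depth i h1 h2
    by_cases hc : i < cs.length ∧ 0 < depth
    · cases f2 with
      | zero => omega
      | succ f2 =>
        rw [pvScanObjA, pvScanObjA, if_pos hc, if_pos hc]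
        by_cases h1' : cs.getD i ' ' = '"'
        · rw [if_pos h1', if_pos h1']
          have hs : pvScanStrA cs '"' f1 (i+1) = pvScanStrA cs '"' f2 (i+1) :=
            pvScanStrA_inv cs '"' f1 f2 (i+1) (by omega) (by omega)
          rw [hs]
          have := le_pvScanStrA cs '"' f2 (i+1)
          exact ih f2 depth _ (by omega) (by omega)
        · rw [if_neg h1', if_neg h1']
          by_cases h2' : cs.getD i ' ' = '\''
          · rw [if_pos h2', if_pos h2']
            have hs : pvScanStrA cs '\'' f1 (i+1) = pvScanStrA cs '\'' f2 (i+1) :=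
              pvScanStrA_inv cs '\'' f1 f2 (i+1) (by omega) (by omega)
            rw [hs]
            have := le_pvScanStrA cs '\'' f2 (i+1)
            exact ih f2 depth _ (by omega) (by omega)
          · rw [if_neg h2', if_neg h2']
            by_cases h3' : cs.getD i ' ' = '{'
            · rw [if_pos h3', if_pos h3']; exact ih f2 (depth+1) (i+1) (by omega) (by omega)
            · rw [if_neg h3', if_neg h3']
              by_cases h4' : cs.getD i ' ' = '}'
              · rw [if_pos h4', if_pos h4']; exact ih f2 (depth-1) (i+1) (by omega) (by omega)
              · rw [if_neg h4', if_neg h4']; exact ih f2 depth (i+1) (by omega) (by omega)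
    · by_cases hd : 0 < depth
      · have hn : ¬ i < cs.length := fun hh => hc ⟨hh, hd⟩
        rw [pvScanObjA_stop cs _ depth i hn, pvScanObjA_stop cs _ depth i hn]
      · have hd0 : depth = 0 := by omega
        subst hd0
        rw [pvScanObjA_depth0, pvScanObjA_depth0]

theorem pvLoopB_inv (cs : List Char) : ∀ (f1 f2 i depth start : Nat) (quote : Option Char) (acc : List (String × Int × Int)),
    cs.length ≤ i + f1 → cs.length ≤ i + f2 →
    pvLoopB cs f1 i depth start quote acc = pvLoopB cs f2 i depth start quote acc := by
  intro f1
  induction f1 with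
  | zero =>
    intro f2 i depth start quote acc h1 h2
    cases f2 with
    | zero => rfl
    | succ f2 =>
      cases quote <;> rw [pvLoopB, pvLoopB, if_neg (by omega : ¬ i < cs.length)]
  | succ f1 ih =>
    intro f2 i depth start quote acc h1 h2
    by_cases hn : i < cs.length
    · cases f2 with
      | zero => omega
      | succ f2 =>
        cases quote with
        | none =>
          rw [pvLoopB, pvLoopB, if_pos hn, if_pos hn]
          by_cases hd : depth = 0
          · rw [if_pos hd, if_pos hd]
            by_cases hw : cs.getD i ' ' ∈ [' ', '\t', '\n', '\r', ',']
            · rw [if_pos hw, if_pos hw]; exact ih f2 (i+1) _ _ _ _ (by omega) (by omega)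
            · rw [if_neg hw, if_neg hw]
              by_cases hb : cs.getD i ' ' = ']'
              · rw [if_pos hb, if_pos hb]
              · rw [if_neg hb, if_neg hb]
                by_cases ho : cs.getD i ' ' = '{'
                · rw [if_pos ho, if_pos ho]; exact ih f2 (i+1) _ _ _ _ (by omega) (by omega)
                · rw [if_neg ho, if_neg ho]; exact ih f2 (i+1) _ _ _ _ (by omega) (by omega)
          · rw [if_neg hd, if_neg hd]
            by_cases hqq : cs.getD i ' ' = '"' ∨ cs.getD i ' ' = '\''
            · rw [if_pos hqq, if_pos hqq]; exact ih f2 (i+1) _ _ _ _ (by omega) (by omega)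
            · rw [if_neg hqq, if_neg hqq]
              by_cases ho : cs.getD i ' ' = '{'
              · rw [if_pos ho, if_pos ho]; exact ih f2 (i+1) _ _ _ _ (by omega) (by omega)
              · rw [if_neg ho, if_neg ho]
                by_cases hcl : cs.getD i ' ' = '}'
                · rw [if_pos hcl, if_pos hcl]
                  by_cases hd1 : depth = 1
                  · rw [if_pos hd1, if_pos hd1]; exact ih f2 (i+1) _ _ _ _ (by omega) (by omega)
                  · rw [if_neg hd1, if_neg hd1]; exact ih f2 (i+1) _ _ _ _ (by omega) (by omega)
                · rw [if_neg hcl, if_neg hcl]; exact ih f2 (i+1) _ _ _ _ (by omega) (by omega)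
        | some q =>
          rw [pvLoopB, pvLoopB, if_pos hn, if_pos hn]
          by_cases hd : depth = 0
          · rw [if_pos hd, if_pos hd]
            by_cases hw : cs.getD i ' ' ∈ [' ', '\t', '\n', '\r', ',']
            · rw [if_pos hw, if_pos hw]; exact ih f2 (i+1) _ _ _ _ (by omega) (by omega)
            · rw [if_neg hw, if_neg hw]
              by_cases hb : cs.getD i ' ' = ']'
              · rw [if_pos hb, if_pos hb]
              · rw [if_neg hb, if_neg hb]
                by_cases ho : cs.getD i ' ' = '{'
                · rw [if_pos ho, if_pos ho]; exact ih f2 (i+1) _ _ _ _ (by omega) (by omega)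
                · rw [if_neg ho, if_neg ho]; exact ih f2 (i+1) _ _ _ _ (by omega) (by omega)
          · rw [if_neg hd, if_neg hd]
            by_cases hq : cs.getD i ' ' = q
            · rw [if_pos hq, if_pos hq]; exact ih f2 (i+1) _ _ _ _ (by omega) (by omega)
            · rw [if_neg hq, if_neg hq]
              by_cases he : cs.getD i ' ' = '\\'
              · rw [if_pos he, if_pos he]; exact ih f2 (i+2) _ _ _ _ (by omega) (by omega)
              · rw [if_neg he, if_neg he]; exact ih f2 (i+1) _ _ _ _ (by omega) (by omega)
    · cases f2 with
      | zero => cases quote <;> rw [pvLoopB, pvLoopB, if_neg hn]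
      | succ f2 => cases quote <;> rw [pvLoopB, pvLoopB, if_neg hn, if_neg hn]

-- B in string state from i = B after A's string scan (same exit index).
theorem pvLoopB_string (cs : List Char) (q : Char) : ∀ (fb fa i depth start : Nat) (acc : List (String × Int × Int)),
    0 < depth → cs.length ≤ i + fb → cs.length ≤ i + fa →
    pvLoopB cs fb i depth start (some q) acc = pvLoopB cs fb (pvScanStrA cs q fa i) depth start none acc := by
  intro fb
  induction fb with
  | zero =>
    intro fa i depth start acc hd h1 h2
    rw [pvScanStrA_stop cs q fa i (by omega), pvLoopB, pvLoopB]
  | succ fb ih =>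
    intro fa i depth start acc hd h1 h2
    by_cases hn : i < cs.length
    · cases fa with
      | zero => omega
      | succ fa =>
        by_cases hq : cs.getD i ' ' = q
        · rw [pvScanStrA, if_neg (fun hh => hh.2 hq), if_pos hn]
          conv_lhs => rw [pvLoopB]
          rw [if_pos hn, if_neg (by omega : ¬ depth = 0), if_pos hq]
          exact pvLoopB_inv cs fb (fb+1) (i+1) depth start none acc (by omega) (by omega)
        · rw [pvScanStrA, if_pos ⟨hn, hq⟩]
          conv_lhs => rw [pvLoopB]
          rw [if_pos hn, if_neg (by omega : ¬ depth = 0), if_neg hq]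
          by_cases he : cs.getD i ' ' = '\\'
          · rw [if_pos he, if_pos he, ih fa (i+2) depth start acc hd (by omega) (by omega)]
            exact pvLoopB_inv cs fb (fb+1) _ depth start none acc
              (by have := le_pvScanStrA cs q fa (i+2); omega)
              (by have := le_pvScanStrA cs q fa (i+2); omega)
          · rw [if_neg he, if_neg he, ih fa (i+1) depth start acc hd (by omega) (by omega)]
            exact pvLoopB_inv cs fb (fb+1) _ depth start none acc
              (by have := le_pvScanStrA cs q fa (i+1); omega)
              (by have := le_pvScanStrA cs q fa (i+1); omega)
    · rw [pvScanStrA_stop cs q fa i hn, pvLoopB, pvLoopB, if_neg hn, if_neg hn]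

-- B in object state (no open string) from i = B at top level after A's object scan, object appended.
theorem pvLoopB_obj (cs : List Char) : ∀ (fb fa depth i start : Nat) (acc : List (String × Int × Int)),
    0 < depth → cs.length ≤ i + fb → cs.length ≤ i + fa →
    pvLoopB cs fb i depth start none acc =
      pvLoopB cs fb (pvScanObjA cs fa depth i) 0 start none
        (acc ++ [(String.ofList ((cs.drop start).take (pvScanObjA cs fa depth i - start)),
                  (start : Int), (pvScanObjA cs fa depth i : Int) - 1)]) := by
  intro fb
  induction fb with
  | zero =>
    intro fa depth i start acc hd h1 h2
    rw [pvScanObjA_stop cs fa depth i (by omega), pvLoopB, pvLoopB,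
      if_pos hd, if_neg (by omega : ¬ (0:Nat) < 0)]
  | succ fb ih =>
    intro fa depth i start acc hd h1 h2
    by_cases hn : i < cs.length
    · cases fa with
      | zero => omega
      | succ fa =>
        rw [pvScanObjA, if_pos ⟨hn, hd⟩]
        conv_lhs => rw [pvLoopB]
        rw [if_pos hn, if_neg (by omega : ¬ depth = 0)]
        by_cases hq1 : cs.getD i ' ' = '"'
        · rw [if_pos hq1, if_pos (Or.inl hq1), hq1,
            pvLoopB_string cs '"' fb fa (i+1) depth start acc hd (by omega) (by omega)]
          have hj := le_pvScanStrA cs '"' fa (i+1)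
          rw [ih fa depth (pvScanStrA cs '"' fa (i+1)) start acc hd (by omega) (by omega)]
          have he := le_pvScanObjA cs fa depth (pvScanStrA cs '"' fa (i+1))
          exact pvLoopB_inv cs fb (fb+1) _ 0 start none _ (by omega) (by omega)
        · rw [if_neg hq1]
          by_cases hq2 : cs.getD i ' ' = '\''
          · rw [if_pos hq2, if_pos (Or.inr hq2), hq2,
              pvLoopB_string cs '\'' fb fa (i+1) depth start acc hd (by omega) (by omega)]
            have hj := le_pvScanStrA cs '\'' fa (i+1)
            rw [ih fa depth (pvScanStrA cs '\'' fa (i+1)) start acc hd (by omega) (by omega)]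
            have he := le_pvScanObjA cs fa depth (pvScanStrA cs '\'' fa (i+1))
            exact pvLoopB_inv cs fb (fb+1) _ 0 start none _ (by omega) (by omega)
          · rw [if_neg hq2, if_neg (not_or.mpr ⟨hq1, hq2⟩)]
            by_cases ho : cs.getD i ' ' = '{'
            · rw [if_pos ho, if_pos ho,
                ih fa (depth+1) (i+1) start acc (by omega) (by omega) (by omega)]
              have he := le_pvScanObjA cs fa (depth+1) (i+1)
              exact pvLoopB_inv cs fb (fb+1) _ 0 start none _ (by omega) (by omega)
            · rw [if_neg ho, if_neg ho]
              by_cases hcl : cs.getD i ' ' = '}'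
              · rw [if_pos hcl, if_pos hcl]
                by_cases hd1 : depth = 1
                · subst hd1
                  rw [if_pos rfl, pvScanObjA_depth0 cs fa (i+1)]
                  have hcast : ((i : Int)) = ((i + 1 : Nat) : Int) - 1 := by push_cast; ring
                  rw [hcast]
                  exact pvLoopB_inv cs fb (fb+1) (i+1) 0 start none _ (by omega) (by omega)
                · rw [if_neg hd1,
                    ih fa (depth-1) (i+1) start acc (by omega) (by omega) (by omega)]
                  have he := le_pvScanObjA cs fa (depth-1) (i+1)
                  exact pvLoopB_inv cs fb (fb+1) _ 0 start none _ (by omega) (by omega)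
              · rw [if_neg hcl, if_neg hcl,
                  ih fa depth (i+1) start acc hd (by omega) (by omega)]
                have he := le_pvScanObjA cs fa depth (i+1)
                exact pvLoopB_inv cs fb (fb+1) _ 0 start none _ (by omega) (by omega)
    · rw [pvScanObjA_stop cs fa depth i hn, pvLoopB, pvLoopB, if_neg hn, if_neg hn,
        if_pos hd, if_neg (by omega : ¬ (0:Nat) < 0)]


theorem pvOuterA_inv (cs : List Char) : ∀ (f1 f2 i : Nat) (acc : List (String × Int × Int)),
    cs.length + 1 ≤ i + f1 → cs.length + 1 ≤ i + f2 →
    pvOuterA cs f1 i acc = pvOuterA cs f2 i acc := by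
  intro f1
  induction f1 with
  | zero =>
    intro f2 i acc h1 h2
    cases f2 with
    | zero => rfl
    | succ f2 => rw [pvOuterA, pvOuterA, if_neg (by omega : ¬ i < cs.length)]
  | succ f1 ih =>
    intro f2 i acc h1 h2
    by_cases hn : i < cs.length
    · cases f2 with
      | zero => omega
      | succ f2 =>
        rw [pvOuterA, pvOuterA, if_pos hn, if_pos hn]
        have hskip : pvSkipWsA cs f1 i = pvSkipWsA cs f2 i :=
          pvSkipWsA_inv cs f1 f2 i (by omega) (by omega)
        rw [hskip]
        have hj := le_pvSkipWsA cs f2 i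
        have hobj : pvScanObjA cs f1 1 (pvSkipWsA cs f2 i + 1) = pvScanObjA cs f2 1 (pvSkipWsA cs f2 i + 1) :=
          pvScanObjA_inv cs f1 f2 1 (pvSkipWsA cs f2 i + 1) (by omega) (by omega)
        rw [hobj]
        by_cases hle : cs.length ≤ pvSkipWsA cs f2 i
        · rw [if_pos hle, if_pos hle]
        · rw [if_neg hle, if_neg hle]
          by_cases hb : cs.getD (pvSkipWsA cs f2 i) ' ' = ']'
          · rw [if_pos hb, if_pos hb]
          · rw [if_neg hb, if_neg hb]
            by_cases ho : cs.getD (pvSkipWsA cs f2 i) ' ' = '{'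
            · rw [if_neg (fun hh => hh ho), if_neg (fun hh => hh ho)]
              have he := le_pvScanObjA cs f2 1 (pvSkipWsA cs f2 i + 1)
              exact ih f2 _ _ (by omega) (by omega)
            · rw [if_pos (fun hh => ho hh), if_pos (fun hh => ho hh)]
              exact ih f2 _ _ (by omega) (by omega)
    · cases f2 with
      | zero => rw [pvOuterA, pvOuterA, if_neg hn]
      | succ f2 => rw [pvOuterA, pvOuterA, if_neg hn, if_neg hn]

-- A's outer loop is unchanged by stepping over one whitespace/comma character.
theorem pvOuterA_ws_step (cs : List Char) (fuel i : Nat) (acc : List (String × Int × Int))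
    (hf : cs.length + 1 ≤ i + fuel) (hn : i < cs.length)
    (hw : cs.getD i ' ' ∈ [' ', '\t', '\n', '\r', ',']) :
    pvOuterA cs fuel i acc = pvOuterA cs fuel (i+1) acc := by
  cases fuel with
  | zero => omega
  | succ fuel =>
    have hskip1 : pvSkipWsA cs fuel i = pvSkipWsA cs fuel (i+1) := by
      cases fuel with
      | zero => omega
      | succ fuel =>
        rw [pvSkipWsA, if_pos ⟨hn, hw⟩]
        exact pvSkipWsA_inv cs fuel (fuel+1) (i+1) (by omega) (by omega)
    by_cases hn1 : i + 1 < cs.length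
    · conv_lhs => rw [pvOuterA]
      conv_rhs => rw [pvOuterA]
      rw [if_pos hn, if_pos hn1, hskip1]
    · have hstop : pvSkipWsA cs fuel (i+1) = i + 1 :=
        pvSkipWsA_stop cs fuel (i+1) (fun hh => hn1 hh.1)
      conv_lhs => rw [pvOuterA]
      conv_rhs => rw [pvOuterA]
      rw [if_pos hn, if_neg hn1, hskip1, hstop, if_pos (by omega : cs.length ≤ i + 1)]

-- the top-level simulation: B's flat loop at depth 0 = A's outer loop
theorem pvLoopB_top (cs : List Char) : ∀ (fuel i start : Nat) (acc : List (String × Int × Int)),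
    cs.length + 1 ≤ i + fuel →
    pvLoopB cs fuel i 0 start none acc = pvOuterA cs fuel i acc := by
  intro fuel
  induction fuel with
  | zero =>
    intro i start acc hf
    rw [pvLoopB, pvOuterA, if_neg (by omega : ¬ (0:Nat) < 0)]
  | succ fuel ih =>
    intro i start acc hf
    by_cases hn : i < cs.length
    · by_cases hw : cs.getD i ' ' ∈ [' ', '\t', '\n', '\r', ',']
      · conv_lhs => rw [pvLoopB]
        rw [if_pos hn, if_pos rfl, if_pos hw, ih (i+1) start acc (by omega),
          pvOuterA_ws_step cs (fuel+1) i acc (by omega) hn hw]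
        exact pvOuterA_inv cs fuel (fuel+1) (i+1) acc (by omega) (by omega)
      · have hskip : pvSkipWsA cs fuel i = i :=
          pvSkipWsA_stop cs fuel i (fun hh => hw hh.2)
        by_cases hb : cs.getD i ' ' = ']'
        · conv_lhs => rw [pvLoopB]
          conv_rhs => rw [pvOuterA]
          rw [if_pos hn, if_pos rfl, if_neg hw, if_pos hb, if_pos hn, hskip,
            if_neg (by omega : ¬ cs.length ≤ i), if_pos hb]
        · by_cases hob : cs.getD i ' ' = '{'
          · conv_lhs => rw [pvLoopB]
            rw [if_pos hn, if_pos rfl, if_neg hw, if_neg hb, if_pos hob,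
              pvLoopB_obj cs fuel fuel 1 (i+1) i acc (by omega) (by omega) (by omega)]
            have hle := le_pvScanObjA cs fuel 1 (i+1)
            rw [ih (pvScanObjA cs fuel 1 (i+1)) i _ (by omega)]
            conv_rhs => rw [pvOuterA]
            rw [if_pos hn, hskip, if_neg (by omega : ¬ cs.length ≤ i), if_neg hb,
              if_neg (fun hh => hh hob)]
          · conv_lhs => rw [pvLoopB]
            conv_rhs => rw [pvOuterA]
            rw [if_pos hn, if_pos rfl, if_neg hw, if_neg hb, if_neg hob, if_pos hn, hskip,
              if_neg (by omega : ¬ cs.length ≤ i), if_neg hb, if_pos (fun hh => hob hh),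
              ih (i+1) start acc (by omega)]
    · rw [pvLoopB, pvOuterA, if_neg hn, if_neg hn, if_neg (by omega : ¬ (0:Nat) < 0)]

-- ===== VERDICT (by name: the statement is the Claim_ definition above) =====
theorem extraer_objetos_con_braces_spec : Claim_equal_extraer_objetos_con_braces := by
  intro content inicio_marker _
  unfold Spec_extraer_objetos_con_braces extraer_objetos_con_braces extraer_objetos_con_braces_alt
  split
  · rfl
  · exact (pvLoopB_top content.toList (content.toList.length + 1) _ _ [] (by omega)).symm
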